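-- pv_equiv track=rewrite | github.com/xander1450/supervised_learning_baf | training/train.py | infer_cv_splits
-- ===== SOURCE A (Python) =====
-- def infer_cv_splits(labels: list[str]) -> int:
--     counts: dict[str, int] = {}
--     for label in labels:
--         counts[label] = counts.get(label, 0) + 1
--     min_count = min(counts.values())
--     if min_count < 2:
--         raise ValueError(
--             "Each class needs at least 2 examples in the training split for calibration."
--         )
--     return min(5, min_count)
-- ===== SOURCE B (Python) =====
-- def infer_cv_splits(labels: list[str]) -> int:
--     ordered = sorted(labels)
--     run_lengths = []
--     run = 0
--     prev = None
--     for label in ordered: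
--         if run > 0 and label != prev:
--             run_lengths.append(run)
--             run = 0
--         run += 1
--         prev = label
--     run_lengths.append(run)
--     min_count = min(run_lengths)
--     if min_count < 2:
--         raise ValueError(
--             "Each class needs at least 2 examples in the training split for calibration."
--         )
--     return min(5, min_count)
-- ===== Notes on version B (the rewrite author's own statement) =====
-- stated objective: alternative
-- what changed: Replaces the incrementally built frequency dictionary and min over its values with sort-then-run-scan: sort the labels, walk once tracking consecutive run lengths, and take the min run length.
import Mathlib
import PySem

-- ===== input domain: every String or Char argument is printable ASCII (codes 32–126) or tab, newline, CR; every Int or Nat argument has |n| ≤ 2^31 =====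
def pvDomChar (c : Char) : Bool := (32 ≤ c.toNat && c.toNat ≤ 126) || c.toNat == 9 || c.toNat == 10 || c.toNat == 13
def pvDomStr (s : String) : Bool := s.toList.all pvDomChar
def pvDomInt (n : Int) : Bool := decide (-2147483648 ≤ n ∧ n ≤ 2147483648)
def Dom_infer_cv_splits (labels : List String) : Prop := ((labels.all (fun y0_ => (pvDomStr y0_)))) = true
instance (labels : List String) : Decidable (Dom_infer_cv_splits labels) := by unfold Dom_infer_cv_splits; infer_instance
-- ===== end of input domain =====

-- B replaces A's frequency dictionary with sort-then-run-scan: min consecutive run length of sorted labels.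

-- ===== PORT A =====
-- counts[label] = counts.get(label, 0) + 1 over labels; min(counts.values()); guard; min(5, m).
-- Where the Python raises ValueError (empty labels, or a class with fewer than 2 examples) the
-- port returns 0; those inputs are excluded by Pre_infer_cv_splits.
def infer_cv_splits (labels : List String) : Int :=
  let counts : PySem.Dict String Int :=
    labels.foldl (fun d label => d.insert label (d.getD label 0 + 1)) PySem.Dict.empty
  match PySem.List.min? counts.values (fun v => v) with
  | none => 0
  | some min_count => if min_count < 2 then 0 else min 5 min_count

-- ===== PORT B =====
-- Loop body of Source B: state (run_lengths, run, prev); 'if run > 0 and label != prev: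
-- run_lengths.append(run); run = 0' then 'run += 1; prev = label'.
def pvStep (s : List Int × Int × Option String) (label : String) : List Int × Int × Option String :=
  let s' := if 0 < s.2.1 ∧ some label ≠ s.2.2 then (s.1 ++ [s.2.1], (0 : Int)) else (s.1, s.2.1)
  (s'.1, s'.2 + 1, some label)

-- sorted(labels); run scan; run_lengths.append(run); min(run_lengths); guard; min(5, m).
-- Raise paths (min_count < 2, which also covers empty labels via the final [0]) return 0 likewise.
def infer_cv_splits_alt (labels : List String) : Int :=
  let ordered := PySem.List.sorted labels (fun x => x) false
  let st := ordered.foldl pvStep (([] : List Int), (0 : Int), (none : Option String))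
  let run_lengths := st.1 ++ [st.2.1]
  match PySem.List.min? run_lengths (fun v => v) with
  | none => 0
  | some min_count => if min_count < 2 then 0 else min 5 min_count

-- ===== PRECONDITION & SPEC =====
-- A raises ValueError when labels is empty (min of an empty sequence) or when some label occurs
-- fewer than 2 times; exactly those inputs are excluded.
def Pre_infer_cv_splits (labels : List String) : Prop :=
  labels ≠ [] ∧ ∀ l ∈ labels, 2 ≤ labels.count l
instance (labels : List String) : Decidable (Pre_infer_cv_splits labels) := by
  unfold Pre_infer_cv_splits; infer_instance
def pvWitness_infer_cv_splits : List String := (["a", "a", "b", "b", "b"])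

def Spec_infer_cv_splits (labels : List String) (out : Int) : Prop := out = infer_cv_splits_alt labels
instance (labels : List String) (out : Int) : Decidable (Spec_infer_cv_splits labels out) := by unfold Spec_infer_cv_splits; infer_instance

-- ===== CLAIM (what is proved, stated in full; the proofs are below) =====
def Claim_equal_infer_cv_splits : Prop := ∀ (labels : List String), Dom_infer_cv_splits labels → Pre_infer_cv_splits labels → Spec_infer_cv_splits labels (infer_cv_splits labels)

-- ===== LEMMAS AND PROOFS =====

-- Recursive description of the run lengths B's scan emits after a run of k copies of p is open.
def pvRuns (p : String) (k : Int) : List String → List Int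
  | [] => [k]
  | x :: t => if x = p then pvRuns p (k + 1) t else k :: pvRuns x 1 t

-- B's fold, started with an open run, produces exactly pvRuns.
theorem foldl_pvStep_eq_pvRuns (s : List String) : ∀ (rs : List Int) (k : Int) (p : String),
    0 < k →
    (s.foldl pvStep (rs, k, some p)).1 ++ [(s.foldl pvStep (rs, k, some p)).2.1]
      = rs ++ pvRuns p k s := by
  induction s with
  | nil => intro rs k p _; simp [pvRuns]
  | cons x t ih =>
      intro rs k p hk
      by_cases hx : x = p
      · subst hx
        have hstep : pvStep (rs, k, some x) x = (rs, k + 1, some x) := by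
          simp [pvStep]
        simp only [List.foldl_cons, hstep, pvRuns]
        exact ih rs (k + 1) x (by omega)
      · have hstep : pvStep (rs, k, some p) x = (rs ++ [k], 1, some x) := by
          simp [pvStep, hk, hx]
        simp only [List.foldl_cons, hstep, pvRuns, if_neg hx]
        rw [ih (rs ++ [k]) 1 x (by omega)]
        simp

-- On a sorted tail t whose elements all dominate p, the emitted run lengths are exactly the
-- per-class counts (k closes p's run; every other class contributes its count in t).
theorem mem_pvRuns_iff (t : List String) : ∀ (p : String) (k : Int),
    0 < k → List.Pairwise (fun a b => a ≤ b) t → (∀ y ∈ t, p ≤ y) →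
    ∀ v : Int, v ∈ pvRuns p k t ↔
      (v = k + (t.count p : Int) ∨ ∃ a ∈ t, a ≠ p ∧ (t.count a : Int) = v) := by
  induction t with
  | nil => intro p k _ _ _ v; simp [pvRuns]
  | cons x t ih =>
      intro p k hk hpw hle v
      have hpw' : List.Pairwise (fun a b => a ≤ b) t := hpw.of_cons
      have hxle : ∀ y ∈ t, x ≤ y := fun y hy => List.rel_of_pairwise_cons hpw hy
      by_cases hx : x = p
      · subst hx
        rw [pvRuns, if_pos rfl, ih x (k + 1) (by omega) hpw' hxle v]
        constructor
        · rintro (rfl | ⟨a, ha, hap, rfl⟩)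
          · left; simp; ring
          · exact Or.inr ⟨a, List.mem_cons_of_mem _ ha, hap,
              by simp [Ne.symm hap]⟩
        · rintro (rfl | ⟨a, ha, hap, rfl⟩)
          · left; simp; ring
          · rcases List.mem_cons.mp ha with rfl | ha'
            · exact absurd rfl hap
            · exact Or.inr ⟨a, ha', hap, by simp [Ne.symm hap]⟩
      · -- p's run closes: p < x ≤ every element of t, so p does not occur in x :: t.
        have hpx : p < x := lt_of_le_of_ne (hle x (List.mem_cons_self)) (Ne.symm hx)
        have hpnot : p ∉ x :: t := by
          intro hmem
          rcases List.mem_cons.mp hmem with rfl | h'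
          · exact absurd rfl hx
          · exact absurd (hxle p h') (not_le.mpr hpx)
        have hcnt : ((x :: t).count p : Int) = 0 := by
          simp [List.count_eq_zero_of_not_mem hpnot]
        have hanep : ∀ a ∈ t, a ≠ p := fun a ha hap =>
          hpnot (hap ▸ List.mem_cons_of_mem _ ha)
        rw [pvRuns, if_neg hx]
        simp only [List.mem_cons, hcnt, add_zero]
        rw [ih x 1 (by omega) hpw' hxle v]
        constructor
        · rintro (rfl | rfl | ⟨a, ha, hax, rfl⟩)
          · exact Or.inl rfl
          · exact Or.inr ⟨x, Or.inl rfl, Ne.symm (ne_of_lt hpx),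
              by simp; ring⟩
          · exact Or.inr ⟨a, Or.inr ha, hanep a ha, by simp [Ne.symm hax]⟩
        · rintro (rfl | ⟨a, ha, hap, rfl⟩)
          · exact Or.inl rfl
          · rcases ha with rfl | ha'
            · right; left; simp; ring
            · by_cases hax : a = x
              · subst hax; right; left; simp; ring
              · right; right
                exact ⟨a, ha', hax, by simp [Ne.symm hax]⟩

-- min? (with the identity key) only depends on which values occur in the list.
theorem min?_eq_of_mem_iff (xs ys : List Int) (h : ∀ v, v ∈ xs ↔ v ∈ ys) :
    PySem.List.min? xs (fun v => v) = PySem.List.min? ys (fun v => v) := by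
  cases hx : PySem.List.min? xs (fun v => v) with
  | none =>
      rw [PySem.List.min?_eq_none_iff] at hx
      subst hx
      symm
      rw [PySem.List.min?_eq_none_iff]
      exact List.eq_nil_iff_forall_not_mem.mpr (fun v hv => by simp [← h v] at hv)
  | some m =>
      cases hy : PySem.List.min? ys (fun v => v) with
      | none =>
          rw [PySem.List.min?_eq_none_iff] at hy
          subst hy
          exact absurd ((h m).mp (PySem.List.min?_mem hx)) (by simp)
      | some m' =>
          have h1 : m ≤ m' := PySem.List.min?_isMin hx m' ((h m').mpr (PySem.List.min?_mem hy))
          have h2 : m' ≤ m := PySem.List.min?_isMin hy m ((h m).mp (PySem.List.min?_mem hx))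
          exact congrArg some (le_antisymm h1 h2)

-- The values of A's count dictionary are the counts of the labels (one per distinct label).
theorem counter_values_mem_iff (labels : List String) (v : Int) :
    v ∈ (labels.foldl (fun d label => d.insert label (d.getD label 0 + 1))
          PySem.Dict.empty).values ↔
    ∃ a ∈ labels, (labels.count a : Int) = v := by
  rw [PySem.Dict.foldl_insert_getD_add_one_eq_counter]
  have hvals : (PySem.Dict.counter labels).values
      = (PySem.Set.ofList labels).map (fun k => ((labels.count k : Nat) : Int)) := by
    have := PySem.Dict.items_counter (xs := labels)
    simp only [PySem.Dict.values, this, List.map_map]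
    rfl
  rw [hvals]
  simp only [List.mem_map]
  constructor
  · rintro ⟨k, hk, rfl⟩
    exact ⟨k, (PySem.Set.mem_ofList (xs := labels) (y := k)).mp hk, rfl⟩
  · rintro ⟨k, hk, rfl⟩
    exact ⟨k, (PySem.Set.mem_ofList (xs := labels) (y := k)).mpr hk, rfl⟩

-- A and B agree on every input (also outside Pre_, where both return the placeholder 0).
theorem infer_cv_splits_eq (labels : List String) :
    infer_cv_splits labels = infer_cv_splits_alt labels := by
  unfold infer_cv_splits infer_cv_splits_alt
  cases hs : PySem.List.sorted labels (fun x => x) false with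
  | nil =>
      have : labels = [] := (PySem.List.sorted_eq_nil_iff labels _ false).mp hs
      subst this
      decide
  | cons x t =>
      have hperm : (x :: t).Perm labels := hs ▸ PySem.List.sorted_perm labels (fun x => x) false
      have hpw : List.Pairwise (fun a b => a ≤ b) (x :: t) := by
        have := PySem.List.sorted_pairwise labels (fun x => x)
        rwa [hs] at this
      have hfirst : pvStep ([], 0, none) x = ([], 1, some x) := by simp [pvStep]
      simp only [List.foldl_cons, hfirst]
      rw [foldl_pvStep_eq_pvRuns t [] 1 x (by omega), List.nil_append]
      rw [min?_eq_of_mem_iff]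
      intro v
      rw [counter_values_mem_iff labels v,
          mem_pvRuns_iff t x 1 (by omega) hpw.of_cons
            (fun y hy => List.rel_of_pairwise_cons hpw hy) v]
      constructor
      · rintro ⟨a, ha, rfl⟩
        rw [← hperm.count_eq a]
        rcases List.mem_cons.mp ((hperm.mem_iff).mpr ha) with rfl | ha'
        · left; simp; ring
        · by_cases hax : a = x
          · subst hax; left; simp; ring
          · exact Or.inr ⟨a, ha', hax, by simp [Ne.symm hax]⟩
      · rintro (rfl | ⟨a, ha, hax, rfl⟩)
        · exact ⟨x, hperm.mem_iff.mp List.mem_cons_self,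
            by rw [← hperm.count_eq x]; simp; ring⟩
        · exact ⟨a, hperm.mem_iff.mp (List.mem_cons_of_mem _ ha),
            by rw [← hperm.count_eq a]; simp [Ne.symm hax]⟩

-- ===== VERDICT (by name: the statement is the Claim_ definition above) =====
theorem infer_cv_splits_spec : Claim_equal_infer_cv_splits := by
  intro labels _ _
  unfold Spec_infer_cv_splits
  exact infer_cv_splits_eq labels
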